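-- pv_equiv track=rewrite | github.com/bhk37/CNT-Growths | src/..notescalculate_density.py | find_tubes
-- ===== SOURCE A (Python) =====
-- def find_tubes(diff2, threshold):
--     tubes = []
--     peak = False
--
--     for i in range(0, len(diff2)):
--         # Peaks must be larger than the threshold
--         if diff2[i] >= threshold:
--             if not peak:
--                 peak = True
--                 tubes += [i]
--             else:
--                 # Record the location of the peak
--                 if diff2[i] > diff2[tubes[-1]]: tubes[-1] = i
--         else:
--             peak = False
--
--     return tubes
-- ===== SOURCE B (Python) =====
-- def find_tubes(diff2, threshold):
--     # Run-splitting decomposition: scan for the start of each contiguous run of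
--     # values >= threshold, find the run's end, and record the first index of the
--     # run's maximum via max over ascending indices.
--     tubes = []
--     n = len(diff2)
--     i = 0
--     while i < n:
--         if diff2[i] >= threshold:
--             j = i + 1
--             while j < n and diff2[j] >= threshold:
--                 j += 1
--             tubes.append(max(range(i, j), key=diff2.__getitem__))
--             i = j
--         else:
--             i += 1
--     return tubes
-- ===== Notes on version B (the rewrite author's own statement) =====
-- stated objective: alternative
-- what changed: Replaced A's single-pass boolean state machine (peak flag with in-place last-element updates) by a run-splitting decomposition: find each contiguous above-threshold run and append the first index of its maximum via max over ascending indices.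
import Mathlib
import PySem

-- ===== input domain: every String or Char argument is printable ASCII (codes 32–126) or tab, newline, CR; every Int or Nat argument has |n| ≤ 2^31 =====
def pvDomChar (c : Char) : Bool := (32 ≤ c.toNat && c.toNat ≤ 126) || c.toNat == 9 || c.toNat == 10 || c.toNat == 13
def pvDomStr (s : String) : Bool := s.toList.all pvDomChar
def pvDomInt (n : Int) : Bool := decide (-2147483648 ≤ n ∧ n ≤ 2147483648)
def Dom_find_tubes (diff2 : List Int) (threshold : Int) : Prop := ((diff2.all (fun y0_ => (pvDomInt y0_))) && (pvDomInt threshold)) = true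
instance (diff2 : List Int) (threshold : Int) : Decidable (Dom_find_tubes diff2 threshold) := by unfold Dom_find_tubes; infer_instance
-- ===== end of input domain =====

-- B replaces A's peak-flag state machine by a run-splitting decomposition (find each
-- above-threshold run, take the first index of its maximum); alternative, same cost.


-- ===== PORT A =====
-- A's for-loop over range(len(diff2)) with state (tubes, peak), as structural
-- recursion on the index; diff2[i], tubes[-1] and the tubes[-1] = i update are exact
-- (the getD defaults are unreachable: the indices are in range by the guards).
def find_tubes_loopA (d : List Int) (t : Int) (i : Nat) (tubes : List Int) (peak : Bool) :
    List Int :=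
  if _h : i < d.length then
    if t ≤ (PySem.List.pyGet? d (i : Int)).getD 0 then
      if peak = false then
        find_tubes_loopA d t (i + 1) (tubes ++ [(i : Int)]) true
      else
        let last := (PySem.List.pyGet? tubes (-1)).getD 0
        if (PySem.List.pyGet? d last).getD 0 < (PySem.List.pyGet? d (i : Int)).getD 0 then
          find_tubes_loopA d t (i + 1) (tubes.dropLast ++ [(i : Int)]) true
        else
          find_tubes_loopA d t (i + 1) tubes true
    else
      find_tubes_loopA d t (i + 1) tubes false
  else tubes
termination_by d.length - i

def find_tubes (diff2 : List Int) (threshold : Int) : List Int :=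
  find_tubes_loopA diff2 threshold 0 [] false

-- ===== PORT B =====
-- while j < n and diff2[j] >= threshold: j += 1
def find_tubes_runEnd (d : List Int) (t : Int) (j : Nat) : Nat :=
  if _h : j < d.length ∧ t ≤ (PySem.List.pyGet? d (j : Int)).getD 0 then
    find_tubes_runEnd d t (j + 1)
  else j
termination_by d.length - j
decreasing_by omega

theorem find_tubes_runEnd_ge (d : List Int) (t : Int) (j : Nat) :
    j ≤ find_tubes_runEnd d t j := by
  fun_induction find_tubes_runEnd d t j with
  | case1 j h ih => omega
  | case2 j h => omega

-- max(range(i, j), key=diff2.__getitem__): fold keeping the FIRST strictly-largest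
-- element, exactly Python's max over the ascending index range.
def find_tubes_maxIdx (d : List Int) (best k j : Nat) : Nat :=
  if _h : k < j then
    find_tubes_maxIdx d
      (if (PySem.List.pyGet? d (best : Int)).getD 0 < (PySem.List.pyGet? d (k : Int)).getD 0
       then k else best) (k + 1) j
  else best
termination_by j - k

-- outer while loop of B, with the accumulated tubes list
def find_tubes_loopB (d : List Int) (t : Int) (i : Nat) (tubes : List Int) : List Int :=
  if _h : i < d.length then
    if t ≤ (PySem.List.pyGet? d (i : Int)).getD 0 then
      let j := find_tubes_runEnd d t (i + 1)
      find_tubes_loopB d t j (tubes ++ [(find_tubes_maxIdx d i (i + 1) j : Int)])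
    else
      find_tubes_loopB d t (i + 1) tubes
  else tubes
termination_by d.length - i
decreasing_by
  · have := find_tubes_runEnd_ge d t (i + 1); omega
  · omega

def find_tubes_alt (diff2 : List Int) (threshold : Int) : List Int :=
  find_tubes_loopB diff2 threshold 0 []

-- ===== PRECONDITION & SPEC =====
def Spec_find_tubes (diff2 : List Int) (threshold : Int) (out : List Int) : Prop := out = find_tubes_alt diff2 threshold
instance (diff2 : List Int) (threshold : Int) (out : List Int) : Decidable (Spec_find_tubes diff2 threshold out) := by unfold Spec_find_tubes; infer_instance

-- ===== CLAIM (what is proved, stated in full; the proofs are below) =====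
def Claim_equal_find_tubes : Prop := ∀ (diff2 : List Int) (threshold : Int), Dom_find_tubes diff2 threshold → Spec_find_tubes diff2 threshold (find_tubes diff2 threshold)

-- ===== LEMMAS AND PROOFS =====

theorem find_tubes_runEnd_stop (d : List Int) (t : Int) (j : Nat)
    (h : ¬ (j < d.length ∧ t ≤ (PySem.List.pyGet? d (j : Int)).getD 0)) :
    find_tubes_runEnd d t j = j := by
  conv_lhs => rw [find_tubes_runEnd]
  exact dif_neg h

theorem find_tubes_runEnd_step (d : List Int) (t : Int) (j : Nat)
    (h : j < d.length ∧ t ≤ (PySem.List.pyGet? d (j : Int)).getD 0) :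
    find_tubes_runEnd d t j = find_tubes_runEnd d t (j + 1) := by
  conv_lhs => rw [find_tubes_runEnd]
  exact dif_pos h

theorem find_tubes_maxIdx_stop (d : List Int) (best k j : Nat) (h : ¬ k < j) :
    find_tubes_maxIdx d best k j = best := by
  conv_lhs => rw [find_tubes_maxIdx]
  exact dif_neg h

-- the combined induction: L1 (out of a run) and L2 (inside a run, b = current best index)
theorem find_tubes_main (d : List Int) (t : Int) : ∀ (m : Nat),
    (∀ (i : Nat) (tubes : List Int), d.length - i ≤ m →
      find_tubes_loopA d t i tubes false = find_tubes_loopB d t i tubes) ∧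
    (∀ (k b : Nat) (tubes : List Int), d.length - k ≤ m →
      find_tubes_loopA d t k (tubes ++ [(b : Int)]) true =
      find_tubes_loopB d t (find_tubes_runEnd d t k)
        (tubes ++ [(find_tubes_maxIdx d b k (find_tubes_runEnd d t k) : Int)])) := by
  intro m
  induction m with
  | zero =>
    constructor
    · intro i tubes hm
      have hi : ¬ i < d.length := by omega
      rw [find_tubes_loopA, dif_neg hi, find_tubes_loopB, dif_neg hi]
    · intro k b tubes hm
      have hk : ¬ k < d.length := by omega
      rw [find_tubes_loopA, dif_neg hk,
          find_tubes_runEnd_stop d t k (fun hc => hk hc.1),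
          find_tubes_maxIdx_stop d b k k (by omega),
          find_tubes_loopB, dif_neg hk]
  | succ m ih =>
    obtain ⟨ih1, ih2⟩ := ih
    constructor
    · intro i tubes hm
      by_cases hi : i < d.length
      · by_cases ht : t ≤ (PySem.List.pyGet? d (i : Int)).getD 0
        · rw [find_tubes_loopA, dif_pos hi, if_pos ht, if_pos rfl,
              find_tubes_loopB, dif_pos hi, if_pos ht]
          exact ih2 (i + 1) i tubes (by omega)
        · rw [find_tubes_loopA, dif_pos hi, if_neg ht,
              find_tubes_loopB, dif_pos hi, if_neg ht]
          exact ih1 (i + 1) tubes (by omega)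
      · rw [find_tubes_loopA, dif_neg hi, find_tubes_loopB, dif_neg hi]
    · intro k b tubes hm
      by_cases hk : k < d.length
      · by_cases ht : t ≤ (PySem.List.pyGet? d (k : Int)).getD 0
        · -- still inside the run
          rw [find_tubes_runEnd_step d t k ⟨hk, ht⟩,
              find_tubes_loopA, dif_pos hk, if_pos ht, if_neg (by decide : ¬ (true = false))]
          simp only [PySem.List.pyGet?_neg_one_append_singleton, Option.getD_some,
                     List.dropLast_concat]
          have hrun : k < find_tubes_runEnd d t (k + 1) := by
            have := find_tubes_runEnd_ge d t (k + 1); omega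
          have hmax : find_tubes_maxIdx d b k (find_tubes_runEnd d t (k + 1)) =
              find_tubes_maxIdx d
                (if (PySem.List.pyGet? d (b : Int)).getD 0 <
                    (PySem.List.pyGet? d (k : Int)).getD 0 then k else b)
                (k + 1) (find_tubes_runEnd d t (k + 1)) := by
            conv_lhs => rw [find_tubes_maxIdx]
            rw [dif_pos hrun]
          by_cases hcmp :
              (PySem.List.pyGet? d (b : Int)).getD 0 < (PySem.List.pyGet? d (k : Int)).getD 0
          · rw [if_pos hcmp, hmax, if_pos hcmp]
            exact ih2 (k + 1) k tubes (by omega)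
          · rw [if_neg hcmp, hmax, if_neg hcmp]
            exact ih2 (k + 1) b tubes (by omega)
        · -- the run ends at k
          rw [find_tubes_runEnd_stop d t k (fun hc => ht hc.2),
              find_tubes_maxIdx_stop d b k k (by omega),
              find_tubes_loopA, dif_pos hk, if_neg ht,
              find_tubes_loopB, dif_pos hk, if_neg ht]
          exact ih1 (k + 1) (tubes ++ [(b : Int)]) (by omega)
      · -- past the end
        rw [find_tubes_loopA, dif_neg hk,
            find_tubes_runEnd_stop d t k (fun hc => hk hc.1),
            find_tubes_maxIdx_stop d b k k (by omega),
            find_tubes_loopB, dif_neg hk]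

-- ===== VERDICT (by name: the statement is the Claim_ definition above) =====
theorem find_tubes_spec : Claim_equal_find_tubes := by
  intro diff2 threshold _hdom
  unfold Spec_find_tubes find_tubes find_tubes_alt
  exact (find_tubes_main diff2 threshold diff2.length).1 0 [] (by omega)
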